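-- pv_equiv track=rewrite | github.com/Ag3497120/verantyx-v6 | synth_results/2601afb7.py | transform
-- ===== SOURCE A (Python) =====
-- def transform(grid):
--     h, w = len(grid), len(grid[0])
--     result = [[7] * w for _ in range(h)]
--
--     # Find vertical stripes
--     for col in range(w):
--         color = None
--         start_row = None
--
--         for row in range(h):
--             current = grid[row][col]
--             if current != 7:
--                 if color is None:
--                     color = current
--                     start_row = row
--                 elif current != color:
--                     # Different color in same column - treat as separate stripe
--                     if color is not None:
--                         # Process previous stripe
--                         new_col = (col + 2) % w
--                         for r in range(start_row, row):
--                             result[r][new_col] = color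
--                         color = current
--                         start_row = row
--             else:
--                 if color is not None:
--                     # End of stripe
--                     new_col = (col + 2) % w
--                     for r in range(start_row, row):
--                         result[r][new_col] = color
--                     color = None
--                     start_row = None
--
--         # Handle stripe reaching bottom
--         if color is not None:
--             new_col = (col + 2) % w
--             for r in range(start_row, h):
--                 result[r][new_col] = color
--
--     return result
-- ===== SOURCE B (Python) =====
-- def transform(grid):
--     h, w = len(grid), len(grid[0])
--     result = [[7] * w for _ in range(h)]
--     for row in range(h):
--         for col in range(w):
--             v = grid[row][col]
--             if v != 7:
--                 result[row][(col + 2) % w] = v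
--     return result
-- ===== Notes on version B (the rewrite author's own statement) =====
-- stated objective: simpler
-- what changed: Replaces the per-column stripe state machine (color/start_row tracking, split-on-color-change and bottom-flush handling) with a single double loop that writes each non-7 cell directly to its shifted column (col+2)%w.
import Mathlib
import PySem

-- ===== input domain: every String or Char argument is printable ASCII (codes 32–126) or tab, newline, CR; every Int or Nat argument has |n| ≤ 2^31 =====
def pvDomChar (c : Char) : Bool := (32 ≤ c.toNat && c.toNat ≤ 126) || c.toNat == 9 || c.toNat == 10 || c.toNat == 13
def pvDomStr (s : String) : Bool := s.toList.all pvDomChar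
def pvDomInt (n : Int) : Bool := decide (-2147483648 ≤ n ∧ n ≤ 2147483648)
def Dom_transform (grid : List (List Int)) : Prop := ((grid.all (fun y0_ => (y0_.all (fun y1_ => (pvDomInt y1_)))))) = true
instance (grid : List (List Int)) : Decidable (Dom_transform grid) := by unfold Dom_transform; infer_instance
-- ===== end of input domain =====

-- B replaces A's per-column stripe state machine by one double loop writing each
-- non-7 cell directly to its shifted column (col+2)%w (objective: simpler).

-- shared array-assignment primitive: result[r][c] = v (no-op when out of range, like a
-- Python list assignment that Pre_ guarantees is in range)
def set2d (res : List (List Int)) (r c : Nat) (v : Int) : List (List Int) :=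
  match res, r with
  | [], _ => []
  | row :: rest, 0 => row.set c v :: rest
  | row :: rest, Nat.succ r' => row :: set2d rest r' c v

-- grid[r][c] (in range on every admitted input)
def cell (g : List (List Int)) (r c : Nat) : Int := (g.getD r []).getD c 0

-- ===== PORT A =====
-- for r in range(start, b): result[r][c2] = color
def writeRange (res : List (List Int)) (c2 a b : Nat) (color : Int) : List (List Int) :=
  (List.range' a (b - a)).foldl (fun acc r => set2d acc r c2 color) res

def transform (grid : List (List Int)) : List (List Int) :=
  let h := grid.length
  let w := (grid.headD []).length
  let res0 := List.replicate h (List.replicate w (7 : Int))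
  (List.range w).foldl (fun res col =>
    let st := (List.range h).foldl (fun (p : (Option Int × Nat) × List (List Int)) row =>
      let current := cell grid row col
      if current ≠ 7 then
        match p.1.1 with
        | none => ((some current, row), p.2)
        | some c =>
          if current ≠ c then
            ((some current, row), writeRange p.2 ((col + 2) % w) p.1.2 row c)
          else ((some c, p.1.2), p.2)
      else
        match p.1.1 with
        | some c => ((none, 0), writeRange p.2 ((col + 2) % w) p.1.2 row c)
        | none => ((none, 0), p.2)) ((none, 0), res)
    match st.1.1 with
    | some c => writeRange st.2 ((col + 2) % w) st.1.2 h c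
    | none => st.2) res0

-- ===== PORT B =====
def transform_alt (grid : List (List Int)) : List (List Int) :=
  let h := grid.length
  let w := (grid.headD []).length
  let res0 := List.replicate h (List.replicate w (7 : Int))
  (List.range h).foldl (fun res row =>
    (List.range w).foldl (fun acc col =>
      let v := cell grid row col
      if v ≠ 7 then set2d acc row ((col + 2) % w) v else acc) res) res0

-- ===== PRECONDITION & SPEC =====
-- Pre_ excludes exactly the inputs on which Python A raises: the empty grid
-- (IndexError on grid[0]) and ragged grids with a row shorter than row 0
-- (IndexError on grid[row][col]).
def Pre_transform (grid : List (List Int)) : Prop :=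
  grid ≠ [] ∧ ∀ row ∈ grid, (grid.headD []).length ≤ row.length

instance (grid : List (List Int)) : Decidable (Pre_transform grid) := by
  unfold Pre_transform; infer_instance

def pvWitness_transform : List (List Int) := [[1, 7], [7, 2]]

def Spec_transform (grid : List (List Int)) (out : List (List Int)) : Prop := out = transform_alt grid
instance (grid : List (List Int)) (out : List (List Int)) : Decidable (Spec_transform grid out) := by unfold Spec_transform; infer_instance

-- ===== CLAIM (what is proved, stated in full; the proofs are below) =====
def Claim_equal_transform : Prop := ∀ (grid : List (List Int)), Dom_transform grid → Pre_transform grid → Spec_transform grid (transform grid)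

-- ===== LEMMAS AND PROOFS =====

-- read a cell of a result matrix
def get2 (res : List (List Int)) (i j : Nat) : Int := (res.getD i []).getD j 0

-- apply a list of writes (r, c, v) left to right
def pvApply (res : List (List Int)) (ws : List (Nat × Nat × Int)) : List (List Int) :=
  ws.foldl (fun acc x => set2d acc x.1 x.2.1 x.2.2) res

def pvShape (h w : Nat) (res : List (List Int)) : Prop :=
  res.length = h ∧ ∀ row ∈ res, row.length = w

theorem set2d_length (res : List (List Int)) (r c : Nat) (v : Int) :
    (set2d res r c v).length = res.length := by
  induction res generalizing r with
  | nil => rfl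
  | cons a l ih => cases r <;> simp [set2d, ih]

theorem set2d_rows_len {w : Nat} (res : List (List Int)) (r c : Nat) (v : Int)
    (h2 : ∀ row ∈ res, row.length = w) : ∀ row ∈ set2d res r c v, row.length = w := by
  induction res generalizing r with
  | nil => intro row hrow; simp [set2d] at hrow
  | cons a l ih =>
    intro row hrow
    cases r with
    | zero =>
      simp only [set2d, List.mem_cons] at hrow
      rcases hrow with h | h
      · subst h; rw [List.length_set]; exact h2 a (by simp)
      · exact h2 row (by simp [h])
    | succ r' =>
      simp only [set2d, List.mem_cons] at hrow
      rcases hrow with h | h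
      · exact h2 row (by simp [h])
      · exact ih r' (fun rr hrr => h2 rr (by simp [hrr])) row h

theorem set2d_shape {h w : Nat} {res : List (List Int)} (hs : pvShape h w res)
    (r c : Nat) (v : Int) : pvShape h w (set2d res r c v) := by
  exact ⟨by rw [set2d_length]; exact hs.1, set2d_rows_len res r c v hs.2⟩

theorem getD_set (l : List Int) (c j : Nat) (v : Int) :
    (l.set c v)[j]?.getD 0 = if c = j ∧ c < l.length then v else l[j]?.getD 0 := by
  induction l generalizing c j with
  | nil => simp
  | cons a t ih =>
    cases c with
    | zero => cases j <;> simp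
    | succ c' =>
      cases j with
      | zero => simp
      | succ j' => simpa using ih c' j'

theorem get2_set2d (res : List (List Int)) (r c : Nat) (v : Int) (i j : Nat) :
    get2 (set2d res r c v) i j =
      if r = i ∧ c = j ∧ r < res.length ∧ c < (res.getD r []).length then v
      else get2 res i j := by
  induction res generalizing r i with
  | nil => simp [set2d, get2]
  | cons a l ih =>
    cases r with
    | zero =>
      cases i with
      | zero =>
        simp only [set2d, get2, List.getD, List.getElem?_cons_zero, Option.getD_some]
        rw [getD_set]
        simp
      | succ i' => simp [set2d, get2, List.getD]
    | succ r' =>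
      cases i with
      | zero => simp [set2d, get2]
      | succ i' =>
        simp only [set2d, get2, List.getD, List.getElem?_cons_succ, List.length_cons]
        have h := ih r' i'
        simp only [get2, List.getD] at h
        rw [h]
        simp [Nat.succ_lt_succ_iff]

theorem pvApply_append (res : List (List Int)) (a b : List (Nat × Nat × Int)) :
    pvApply res (a ++ b) = pvApply (pvApply res a) b := by
  simp [pvApply, List.foldl_append]

theorem pvApply_shape {h w : Nat} {res : List (List Int)} (hs : pvShape h w res)
    (ws : List (Nat × Nat × Int)) : pvShape h w (pvApply res ws) := by
  induction ws generalizing res with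
  | nil => exact hs
  | cons x t ih => exact ih (set2d_shape hs _ _ _)

theorem shape_getD_len {h w : Nat} {res : List (List Int)} (hs : pvShape h w res)
    {i : Nat} (hi : i < h) : (res.getD i []).length = w := by
  obtain ⟨h1, h2⟩ := hs
  have hlt : i < res.length := h1 ▸ hi
  have : res.getD i [] = res[i] := by
    simp [List.getD, List.getElem?_eq_getElem hlt]
  rw [this]
  exact h2 _ (List.getElem_mem hlt)

-- main pointwise lemma: applying writes whose values are determined by their key
theorem pvApply_get2 {h w : Nat} (V : Nat → Nat → Int) {res : List (List Int)}
    (hs : pvShape h w res) (ws : List (Nat × Nat × Int))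
    (hws : ∀ x ∈ ws, x.1 < h ∧ x.2.1 < w ∧ x.2.2 = V x.1 x.2.1) (i j : Nat) :
    get2 (pvApply res ws) i j =
      if ∃ x ∈ ws, x.1 = i ∧ x.2.1 = j then V i j else get2 res i j := by
  induction ws generalizing res with
  | nil => simp [pvApply]
  | cons x t ih =>
    obtain ⟨hx1, hx2, hx3⟩ := hws x (by simp)
    have step : pvApply res (x :: t) = pvApply (set2d res x.1 x.2.1 x.2.2) t := rfl
    rw [step, ih (set2d_shape hs _ _ _) (fun y hy => hws y (by simp [hy]))]
    by_cases hext : ∃ y ∈ t, y.1 = i ∧ y.2.1 = j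
    · rw [if_pos hext]
      obtain ⟨y, hy, hk⟩ := hext
      rw [if_pos ⟨y, by simp [hy], hk⟩]
    · rw [if_neg hext, get2_set2d]
      by_cases hkey : x.1 = i ∧ x.2.1 = j
      · have hin : x.1 < res.length ∧ x.2.1 < (res.getD x.1 []).length := by
          refine ⟨hs.1 ▸ hx1, ?_⟩
          rw [shape_getD_len hs hx1]; exact hx2
        rw [if_pos ⟨hkey.1, hkey.2, hin.1, hin.2⟩,
          if_pos ⟨x, by simp, hkey.1, hkey.2⟩]
        rw [hx3, hkey.1, hkey.2]
      · have : ¬(x.1 = i ∧ x.2.1 = j ∧ x.1 < res.length ∧ x.2.1 < (res.getD x.1 []).length) := by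
          tauto
        rw [if_neg this]
        have : ¬∃ y ∈ x :: t, y.1 = i ∧ y.2.1 = j := by
          rintro ⟨y, hy, h1, h2⟩
          simp at hy
          rcases hy with rfl | hy
          · exact hkey ⟨h1, h2⟩
          · exact hext ⟨y, hy, h1, h2⟩
        rw [if_neg this]

-- write lists for each port
def fcol (g : List (List Int)) (w col : Nat) (r : Nat) : Option (Nat × Nat × Int) :=
  if cell g r col ≠ 7 then some (r, (col + 2) % w, cell g r col) else none

def wsCol (g : List (List Int)) (h w col : Nat) : List (Nat × Nat × Int) :=
  (List.range h).filterMap (fcol g w col)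

def wsRowFn (g : List (List Int)) (w r : Nat) : List (Nat × Nat × Int) :=
  (List.range w).filterMap (fun col => fcol g w col r)

-- B's inner fold is pvApply of wsRowFn
theorem b_inner (g : List (List Int)) (w r : Nat) (cs : List Nat) (res : List (List Int)) :
    cs.foldl (fun acc col =>
      let v := cell g r col
      if v ≠ 7 then set2d acc r ((col + 2) % w) v else acc) res
      = pvApply res (cs.filterMap (fun col => fcol g w col r)) := by
  induction cs generalizing res with
  | nil => rfl
  | cons c t ih =>
    by_cases hv : cell g r c = 7
    · have hf : fcol g w c r = none := by simp [fcol, hv]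
      simp only [List.foldl_cons, List.filterMap_cons, hf]
      rw [if_neg (by simp [hv])]
      exact ih res
    · have hf : fcol g w c r = some (r, (c + 2) % w, cell g r c) := by simp [fcol, hv]
      simp only [List.foldl_cons, List.filterMap_cons, hf]
      rw [if_pos hv]
      exact ih _

theorem fold_apply_flat {α : Type} (f : α → List (Nat × Nat × Int)) (rs : List α)
    (res : List (List Int)) :
    rs.foldl (fun acc r => pvApply acc (f r)) res = pvApply res (rs.flatMap f) := by
  induction rs generalizing res with
  | nil => rfl
  | cons r t ih => simp [List.flatMap_cons, pvApply_append, ih]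

theorem foldl_fun_congr {α β : Type} (f g : β → α → β) (l : List α) (b : β)
    (h : ∀ acc x, x ∈ l → f acc x = g acc x) : l.foldl f b = l.foldl g b := by
  induction l generalizing b with
  | nil => rfl
  | cons x t ih =>
    simp only [List.foldl_cons]
    rw [h b x (by simp)]
    exact ih _ (fun acc y hy => h acc y (by simp [hy]))

theorem transform_alt_eq (g : List (List Int)) :
    transform_alt g = pvApply (List.replicate g.length (List.replicate (g.headD []).length (7 : Int)))
      ((List.range g.length).flatMap (wsRowFn g (g.headD []).length)) := by
  unfold transform_alt
  simp only []
  rw [← fold_apply_flat]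
  apply foldl_fun_congr
  intro acc r _
  exact b_inner g _ r _ acc

-- writeRange is pvApply of a mapped segment
theorem writeRange_eq (res : List (List Int)) (c2 a b : Nat) (color : Int) :
    writeRange res c2 a b color
      = pvApply res ((List.range' a (b - a)).map (fun r => (r, c2, color))) := by
  unfold writeRange pvApply
  rw [List.foldl_map]

-- a segment of constant non-7 cells filterMaps to the mapped segment
theorem filterMap_const_seg (g : List (List Int)) (w col : Nat) (c : Int) (l : List Nat)
    (hall : ∀ r ∈ l, cell g r col = c) (hc : c ≠ 7) :
    l.filterMap (fcol g w col) = l.map (fun r => (r, (col + 2) % w, c)) := by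
  induction l with
  | nil => rfl
  | cons r t ih =>
    have hr : cell g r col = c := hall r (by simp)
    have hf : fcol g w col r = some (r, (col + 2) % w, c) := by simp [fcol, hr, hc]
    simp only [List.filterMap_cons, List.map_cons, hf]
    rw [ih (fun rr hrr => hall rr (by simp [hrr]))]

theorem range_split (s b : Nat) (hsb : s ≤ b) :
    List.range b = List.range s ++ List.range' s (b - s) := by
  rw [show b = s + (b - s) by omega, List.range_add, List.range'_eq_map_range]
  simp

-- state of A's inner fold
def colStep (g : List (List Int)) (w col : Nat)
    (p : (Option Int × Nat) × List (List Int)) (row : Nat) :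
    (Option Int × Nat) × List (List Int) :=
  let current := cell g row col
  if current ≠ 7 then
    match p.1.1 with
    | none => ((some current, row), p.2)
    | some c =>
      if current ≠ c then
        ((some current, row), writeRange p.2 ((col + 2) % w) p.1.2 row c)
      else ((some c, p.1.2), p.2)
  else
    match p.1.1 with
    | some c => ((none, 0), writeRange p.2 ((col + 2) % w) p.1.2 row c)
    | none => ((none, 0), p.2)

def upTo (g : List (List Int)) (w col k : Nat) : List (Nat × Nat × Int) :=
  (List.range k).filterMap (fcol g w col)

-- flushing a pending constant segment advances upTo
theorem flush_eq (g : List (List Int)) (w col : Nat) (res : List (List Int))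
    (c : Int) (s b : Nat) (hsb : s ≤ b)
    (hall : ∀ r, s ≤ r → r < b → cell g r col = c) (hc : c ≠ 7) :
    writeRange (pvApply res (upTo g w col s)) ((col + 2) % w) s b c
      = pvApply res (upTo g w col b) := by
  rw [writeRange_eq, ← pvApply_append]
  congr 1
  unfold upTo
  rw [range_split s b hsb, List.filterMap_append]
  congr 1
  rw [filterMap_const_seg g w col c _ (fun r hr => by
    rw [List.mem_range'_1] at hr
    exact hall r hr.1 (by omega)) hc]

-- the machine state after k rows of one column
def stK (g : List (List Int)) (w col : Nat) (res : List (List Int)) (k : Nat) :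
    (Option Int × Nat) × List (List Int) :=
  (List.range k).foldl (colStep g w col) ((none, 0), res)

theorem stK_succ (g : List (List Int)) (w col : Nat) (res : List (List Int)) (k : Nat) :
    stK g w col res (k + 1) = colStep g w col (stK g w col res k) k := by
  unfold stK
  rw [List.range_succ, List.foldl_append, List.foldl_cons, List.foldl_nil]

-- the per-column machine invariant
theorem col_invariant (g : List (List Int)) (w col : Nat) (res : List (List Int)) (k : Nat) :
    ((stK g w col res k).1.1 = none → (stK g w col res k).2 = pvApply res (upTo g w col k)) ∧
    (∀ c, (stK g w col res k).1.1 = some c → c ≠ 7 ∧ (stK g w col res k).1.2 ≤ k ∧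
      (∀ r, (stK g w col res k).1.2 ≤ r → r < k → cell g r col = c) ∧
      (stK g w col res k).2 = pvApply res (upTo g w col (stK g w col res k).1.2)) := by
  induction k with
  | zero =>
    constructor
    · intro _; simp [stK, upTo, pvApply]
    · intro c hc; simp [stK] at hc
  | succ k ih =>
    obtain ⟨ihn, ihs⟩ := ih
    rw [stK_succ]
    by_cases hcur : cell g k col ≠ 7
    · cases hco : (stK g w col res k).1.1 with
      | none =>
        have hres := ihn hco
        simp only [colStep, hco, if_pos hcur]
        constructor
        · intro h; simp at h
        · intro c hc
          simp only [Option.some_inj] at hc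
          subst hc
          refine ⟨hcur, by omega, ?_, ?_⟩
          · intro r h1 h2
            have : r = k := by omega
            simp [this]
          · simpa using hres
      | some c =>
        obtain ⟨hc7, hsk, hseg, hres⟩ := ihs c hco
        by_cases hdiff : cell g k col ≠ c
        · simp only [colStep, hco, if_pos hcur, if_pos hdiff]
          constructor
          · intro h; simp at h
          · intro c' hc'
            simp only [Option.some_inj] at hc'
            subst hc'
            refine ⟨hcur, by omega, ?_, ?_⟩
            · intro r h1 h2
              have : r = k := by omega
              simp [this]
            · rw [hres]
              simpa using flush_eq g w col res c (stK g w col res k).1.2 k hsk hseg hc7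
        · simp only [colStep, hco, if_pos hcur, if_neg hdiff]
          rw [not_not] at hdiff
          constructor
          · intro h; simp at h
          · intro c' hc'
            simp only [Option.some_inj] at hc'
            subst hc'
            refine ⟨hc7, by omega, ?_, by simpa using hres⟩
            intro r h1 h2
            rcases Nat.lt_or_ge r k with h | h
            · exact hseg r h1 h
            · have : r = k := by omega
              rw [this, hdiff]
    · have hup : upTo g w col (k + 1) = upTo g w col k := by
        unfold upTo
        rw [List.range_succ, List.filterMap_append]
        have : fcol g w col k = none := by
          simp only [fcol]
          rw [if_neg hcur]
        simp [this]
      cases hco : (stK g w col res k).1.1 with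
      | none =>
        have hres := ihn hco
        simp only [colStep, hco, if_neg hcur]
        constructor
        · intro _
          rw [hup]
          simpa using hres
        · intro c hc; simp at hc
      | some c =>
        obtain ⟨hc7, hsk, hseg, hres⟩ := ihs c hco
        simp only [colStep, hco, if_neg hcur]
        constructor
        · intro _
          rw [hup]
          have hfl := flush_eq g w col res c (stK g w col res k).1.2 k hsk hseg hc7
          rw [hres]
          simpa using hfl
        · intro c' hc'; simp at hc'

-- running one full column = applying its write list
theorem col_run (g : List (List Int)) (h w col : Nat) (res : List (List Int)) :
    (match (stK g w col res h).1.1 with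
     | some c => writeRange (stK g w col res h).2 ((col + 2) % w) (stK g w col res h).1.2 h c
     | none => (stK g w col res h).2) = pvApply res (wsCol g h w col) := by
  obtain ⟨ihn, ihs⟩ := col_invariant g w col res h
  cases hco : (stK g w col res h).1.1 with
  | none =>
    simpa [wsCol, upTo] using ihn hco
  | some c =>
    obtain ⟨hc7, hsk, hseg, hres⟩ := ihs c hco
    simp only [hco]
    rw [hres, flush_eq g w col res c (stK g w col res h).1.2 h hsk hseg hc7]
    rfl

theorem transform_eq (g : List (List Int)) :
    transform g = pvApply (List.replicate g.length (List.replicate (g.headD []).length (7 : Int)))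
      ((List.range (g.headD []).length).flatMap (wsCol g g.length (g.headD []).length)) := by
  unfold transform
  simp only []
  rw [← fold_apply_flat]
  apply foldl_fun_congr
  intro acc col _
  exact col_run g g.length (g.headD []).length col acc

-- inverse of the column shift
theorem shift_inv (w c : Nat) (hc : c < w) : ((c + 2) % w + (w - 2)) % w = c := by
  have hw : 0 < w := by omega
  rcases Nat.lt_or_ge w 2 with h2 | h2
  · interval_cases w
    · interval_cases c
      decide
  · calc ((c + 2) % w + (w - 2)) % w
        = ((c + 2) % w + (w - 2) % w) % w := by
          rw [Nat.mod_eq_of_lt (show w - 2 < w by omega)]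
      _ = (c + 2 + (w - 2)) % w := (Nat.add_mod _ _ _).symm
      _ = (c + w) % w := by rw [show c + 2 + (w - 2) = c + w by omega]
      _ = c := by rw [Nat.add_mod_right, Nat.mod_eq_of_lt hc]

-- determined value at a key
def Vfn (g : List (List Int)) (w : Nat) (i j : Nat) : Int := cell g i ((j + (w - 2)) % w)

theorem mem_wsCol_flat (g : List (List Int)) (h w : Nat) (x : Nat × Nat × Int) :
    x ∈ (List.range w).flatMap (wsCol g h w) ↔
      ∃ col < w, ∃ r < h, cell g r col ≠ 7 ∧ x = (r, (col + 2) % w, cell g r col) := by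
  simp only [List.mem_flatMap, wsCol, List.mem_filterMap, List.mem_range, fcol]
  constructor
  · rintro ⟨col, hcol, r, hr, hx⟩
    by_cases hc : cell g r col ≠ 7
    · rw [if_pos hc] at hx
      exact ⟨col, hcol, r, hr, hc, (Option.some_inj.mp hx).symm⟩
    · rw [if_neg hc] at hx; exact absurd hx (by simp)
  · rintro ⟨col, hcol, r, hr, hc, rfl⟩
    exact ⟨col, hcol, r, hr, by rw [if_pos hc]⟩

theorem mem_wsRow_flat (g : List (List Int)) (h w : Nat) (x : Nat × Nat × Int) :
    x ∈ (List.range h).flatMap (wsRowFn g w) ↔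
      ∃ col < w, ∃ r < h, cell g r col ≠ 7 ∧ x = (r, (col + 2) % w, cell g r col) := by
  simp only [List.mem_flatMap, wsRowFn, List.mem_filterMap, List.mem_range, fcol]
  constructor
  · rintro ⟨r, hr, col, hcol, hx⟩
    by_cases hc : cell g r col ≠ 7
    · rw [if_pos hc] at hx
      exact ⟨col, hcol, r, hr, hc, (Option.some_inj.mp hx).symm⟩
    · rw [if_neg hc] at hx; exact absurd hx (by simp)
  · rintro ⟨col, hcol, r, hr, hc, rfl⟩
    exact ⟨r, hr, col, hcol, by rw [if_pos hc]⟩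

theorem ws_prop (g : List (List Int)) (h w : Nat) (x : Nat × Nat × Int)
    (hx : ∃ col < w, ∃ r < h, cell g r col ≠ 7 ∧ x = (r, (col + 2) % w, cell g r col)) :
    x.1 < h ∧ x.2.1 < w ∧ x.2.2 = Vfn g w x.1 x.2.1 := by
  obtain ⟨col, hcol, r, hr, hc, rfl⟩ := hx
  refine ⟨hr, Nat.mod_lt _ (by omega), ?_⟩
  simp only [Vfn]
  rw [shift_inv w col hcol]

theorem replicate_shape (h w : Nat) :
    pvShape h w (List.replicate h (List.replicate w (7 : Int))) := by
  constructor
  · simp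
  · intro row hrow
    rw [List.eq_of_mem_replicate hrow]
    simp

theorem shape_ext {h w : Nat} {A B : List (List Int)} (hA : pvShape h w A) (hB : pvShape h w B)
    (hpt : ∀ i < h, ∀ j < w, get2 A i j = get2 B i j) : A = B := by
  apply List.ext_getElem (by rw [hA.1, hB.1])
  intro i hiA hiB
  apply List.ext_getElem
  · rw [hA.2 _ (List.getElem_mem hiA), hB.2 _ (List.getElem_mem hiB)]
  · intro j hjA hjB
    have hih : i < h := hA.1 ▸ hiA
    have hjw : j < w := (hA.2 _ (List.getElem_mem hiA)) ▸ hjA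
    have hthis := hpt i hih j hjw
    simp only [get2, List.getD] at hthis
    rw [List.getElem?_eq_getElem hiA, List.getElem?_eq_getElem hiB] at hthis
    simp only [Option.getD_some] at hthis
    rw [List.getElem?_eq_getElem hjA, List.getElem?_eq_getElem hjB] at hthis
    simpa using hthis

-- final theorem body
theorem transform_eq_alt (g : List (List Int)) : transform g = transform_alt g := by
  set h := g.length
  set w := (g.headD []).length
  rw [transform_eq, transform_alt_eq]
  set res0 := List.replicate h (List.replicate w (7 : Int)) with hres0
  have hs := replicate_shape h w
  rw [← hres0] at hs
  have hA := pvApply_shape hs ((List.range w).flatMap (wsCol g h w))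
  have hB := pvApply_shape hs ((List.range h).flatMap (wsRowFn g w))
  apply shape_ext hA hB
  intro i hi j hj
  rw [pvApply_get2 (Vfn g w) hs _
      (fun x hx => ws_prop g h w x ((mem_wsCol_flat g h w x).mp hx)) i j,
    pvApply_get2 (Vfn g w) hs _
      (fun x hx => ws_prop g h w x ((mem_wsRow_flat g h w x).mp hx)) i j]
  have hcond : (∃ x ∈ (List.range w).flatMap (wsCol g h w), x.1 = i ∧ x.2.1 = j) ↔
      (∃ x ∈ (List.range h).flatMap (wsRowFn g w), x.1 = i ∧ x.2.1 = j) := by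
    constructor
    · rintro ⟨x, hx, hk⟩
      exact ⟨x, (mem_wsRow_flat g h w x).mpr ((mem_wsCol_flat g h w x).mp hx), hk⟩
    · rintro ⟨x, hx, hk⟩
      exact ⟨x, (mem_wsCol_flat g h w x).mpr ((mem_wsRow_flat g h w x).mp hx), hk⟩
  by_cases hc : ∃ x ∈ (List.range w).flatMap (wsCol g h w), x.1 = i ∧ x.2.1 = j
  · rw [if_pos hc, if_pos (hcond.mp hc)]
  · rw [if_neg hc, if_neg (fun hb => hc (hcond.mpr hb))]

-- ===== VERDICT (by name: the statement is the Claim_ definition above) =====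
theorem transform_spec : Claim_equal_transform := by
  intro grid _ _
  unfold Spec_transform
  exact transform_eq_alt grid
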